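-- pv_equiv track=rewrite | github.com/drm424/hashRangeCalc | partitions.py | calculate_partition_bounds
-- ===== SOURCE A (Python) =====
-- def calculate_partition_bounds(num_partitions):
--     max_hash = 2**64 - 1
--     partition_size = max_hash // num_partitions
--
--     partition_bounds = []
--     lower_bound = 0
--
--     for i in range(num_partitions):
--         upper_bound = lower_bound + partition_size - 1
--         partition_bounds.append((lower_bound, upper_bound))
--         lower_bound = upper_bound + 1
--
--     return partition_bounds
-- ===== SOURCE B (Python) =====
-- def calculate_partition_bounds(num_partitions):
--     max_hash = 2**64 - 1
--     partition_size = max_hash // num_partitions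
--     return [(i * partition_size, (i + 1) * partition_size - 1)
--             for i in range(num_partitions)]
-- ===== Notes on version B (the rewrite author's own statement) =====
-- stated objective: simpler
-- what changed: Replaces the loop that threads a running lower_bound accumulator by a closed-form comprehension computing each bound directly from the index (i*partition_size, (i+1)*partition_size-1).
import Mathlib
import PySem

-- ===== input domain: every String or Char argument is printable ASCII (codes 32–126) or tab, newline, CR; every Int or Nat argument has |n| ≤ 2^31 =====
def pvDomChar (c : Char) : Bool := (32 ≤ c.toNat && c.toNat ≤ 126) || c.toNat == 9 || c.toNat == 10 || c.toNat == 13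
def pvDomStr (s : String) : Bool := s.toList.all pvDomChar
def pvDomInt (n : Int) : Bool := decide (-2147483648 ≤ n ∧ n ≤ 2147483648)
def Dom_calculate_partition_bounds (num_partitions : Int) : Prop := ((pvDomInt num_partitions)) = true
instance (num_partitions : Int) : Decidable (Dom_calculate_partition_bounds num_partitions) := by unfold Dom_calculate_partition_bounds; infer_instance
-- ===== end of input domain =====

-- B replaces A's running lower_bound accumulator by a closed-form per-index computation; objective: simpler.


-- ===== PORT A =====
def calculate_partition_bounds (num_partitions : Int) : List (Int × Int) :=
  let max_hash : Int := 2 ^ 64 - 1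
  let partition_size : Int := PySem.Int.floordiv max_hash num_partitions
  let st :=
    (PySem.List.pyRange 0 num_partitions 1).foldl
      (fun (acc : List (Int × Int) × Int) _i =>
        let upper_bound := acc.2 + partition_size - 1
        (acc.1 ++ [(acc.2, upper_bound)], upper_bound + 1))
      ([], 0)
  st.1

-- ===== PORT B =====
def calculate_partition_bounds_alt (num_partitions : Int) : List (Int × Int) :=
  let max_hash : Int := 2 ^ 64 - 1
  let partition_size : Int := PySem.Int.floordiv max_hash num_partitions
  (PySem.List.pyRange 0 num_partitions 1).map
    (fun i => (i * partition_size, (i + 1) * partition_size - 1))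

-- ===== PRECONDITION & SPEC =====
-- Pre_ excludes only num_partitions = 0, on which Python A raises ZeroDivisionError.
def Pre_calculate_partition_bounds (num_partitions : Int) : Prop := num_partitions ≠ 0
instance (num_partitions : Int) : Decidable (Pre_calculate_partition_bounds num_partitions) := by unfold Pre_calculate_partition_bounds; infer_instance
def pvWitness_calculate_partition_bounds : Int := 4

def Spec_calculate_partition_bounds (num_partitions : Int) (out : List (Int × Int)) : Prop := out = calculate_partition_bounds_alt num_partitions
instance (num_partitions : Int) (out : List (Int × Int)) : Decidable (Spec_calculate_partition_bounds num_partitions out) := by unfold Spec_calculate_partition_bounds; infer_instance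

-- ===== CLAIM (what is proved, stated in full; the proofs are below) =====
def Claim_equal_calculate_partition_bounds : Prop := ∀ (num_partitions : Int), Dom_calculate_partition_bounds num_partitions → Pre_calculate_partition_bounds num_partitions → Spec_calculate_partition_bounds num_partitions (calculate_partition_bounds num_partitions)

-- ===== LEMMAS AND PROOFS =====

theorem pv_loop (ps : Int) :
    ∀ (k : Nat) (a : Int) (acc : List (Int × Int)),
      ((PySem.List.pyRange a (a + k) 1).foldl
        (fun (st : List (Int × Int) × Int) _i =>
          (st.1 ++ [(st.2, st.2 + ps - 1)], st.2 + ps - 1 + 1))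
        (acc, a * ps))
      = (acc ++ (PySem.List.pyRange a (a + k) 1).map
          (fun i => (i * ps, (i + 1) * ps - 1)), (a + k) * ps) := by
  intro k
  induction k with
  | zero =>
    intro a acc
    rw [PySem.List.pyRange_one_eq_nil (by omega)]
    simp
  | succ k ih =>
    intro a acc
    rw [PySem.List.pyRange_one_cons (by omega)]
    simp only [List.foldl_cons, List.map_cons]
    have h1 : a * ps + ps - 1 + 1 = (a + 1) * ps := by ring
    have h2 : a + ((k + 1 : Nat) : Int) = (a + 1) + (k : Int) := by push_cast; ring
    rw [h1, h2, ih (a + 1) (acc ++ [(a * ps, a * ps + ps - 1)])]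
    have h3 : a * ps + ps - 1 = (a + 1) * ps - 1 := by ring
    rw [h3, List.append_assoc]
    rfl

-- ===== VERDICT (by name: the statement is the Claim_ definition above) =====
theorem calculate_partition_bounds_spec : Claim_equal_calculate_partition_bounds := by
  intro n _ _
  unfold Spec_calculate_partition_bounds calculate_partition_bounds calculate_partition_bounds_alt
  by_cases h : n ≤ 0
  · rw [PySem.List.pyRange_one_eq_nil h]
    simp
  · have hn : n = 0 + (n.toNat : Int) := by omega
    have := pv_loop (PySem.Int.floordiv (2 ^ 64 - 1) n) n.toNat 0 []
    simp only [zero_mul, List.nil_append] at this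
    rw [← hn] at this
    simp only []
    rw [this]
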